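-- pv_equiv track=rewrite | github.com/Mopckou/observation_processing | src/helpers.py | get_equal_intervals
-- ===== SOURCE A (Python) =====
-- def get_equal_intervals(array):
--     """
--     Метод возвращает непрерывные интервалы массива, которые имеют одинаковое значение внутри одного интервала.
--     :param array:
--     :return:
--     """
--     flag = False
--     marks = []
--     mark = {}
--     for num, val in enumerate(array[:-1]):
--         if val == array[num + 1] and not flag:
--             mark = {
--                 'value': val,
--                 'begin': num
--             }
--             flag = True
--         elif val == array[num + 1] and flag:
--             pass
--         elif val != array[num + 1] and flag:
--             mark['end'] = num
--             flag = False
--             mark['count'] = mark['end'] - mark['begin'] + 1  # колличество одинаковых точек (+1 т.к. включительно)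
--             marks.append(mark)
--
--     if flag:  # если последний элемент == 1
--         mark['end'] = len(array) - 1
--         mark['count'] = mark['end'] - mark['begin'] + 1
--         marks.append(mark)
--     return marks
-- ===== SOURCE B (Python) =====
-- def get_equal_intervals(array):
--     """Two-pointer run scanner: find each maximal run [i, j) of equal values
--     directly, emit it if its length is at least 2, then jump to j."""
--     marks = []
--     start = 0
--     rest = array
--     while rest:
--         v = rest[0]
--         k = 1
--         while k < len(rest) and rest[k] == v:
--             k += 1
--         if k >= 2:
--             marks.append({'value': v, 'begin': start, 'end': start + k - 1, 'count': k})
--         start += k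
--         rest = rest[k:]
--     return marks
-- ===== Notes on version B (the rewrite author's own statement) =====
-- stated objective: simpler
-- what changed: Replaced the flag/look-ahead state machine over adjacent pairs (with a dict mutated across iterations and a post-loop flush) by a direct two-pointer scan that finds each maximal run and emits its interval immediately.
import Mathlib
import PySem

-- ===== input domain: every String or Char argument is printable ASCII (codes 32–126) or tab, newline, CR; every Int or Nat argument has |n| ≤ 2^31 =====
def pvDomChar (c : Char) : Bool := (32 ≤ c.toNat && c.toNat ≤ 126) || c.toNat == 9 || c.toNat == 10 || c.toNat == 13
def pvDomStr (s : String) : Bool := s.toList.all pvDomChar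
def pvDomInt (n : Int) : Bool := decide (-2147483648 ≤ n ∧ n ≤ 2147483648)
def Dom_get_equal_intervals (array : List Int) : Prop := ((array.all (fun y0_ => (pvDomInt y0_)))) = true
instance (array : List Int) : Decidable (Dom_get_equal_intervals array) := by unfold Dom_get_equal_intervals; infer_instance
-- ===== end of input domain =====

-- B replaces A's flag/look-ahead state machine over adjacent pairs by a direct
-- two-pointer scan over maximal runs (same values, simpler decomposition, no speed claim).

-- ===== PORT A =====
-- dict lookup mark[k] (keys are distinct string literals; first match = Python's lookup)
def pvDget (m : List (String × Int)) (k : String) : Int :=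
  (((m.find? (fun q => q.1 == k)).map (·.2)).getD 0)

-- one iteration of A's for-loop; p = (num, val); array[num+1] via pyGet? (always in range here)
def pvStepA (array : List Int) (st : Bool × List (String × Int) × List (List (String × Int)))
    (p : Int × Int) : Bool × List (String × Int) × List (List (String × Int)) :=
  match PySem.List.pyGet? array (p.1 + 1) with
  | none => st   -- unreachable: num+1 is in range for every num enumerating array[:-1]
  | some nxt =>
    if (p.2 == nxt) && !st.1 then
      (true, [("value", p.2), ("begin", p.1)], st.2.2)
    else if (p.2 == nxt) && st.1 then st
    else if !(p.2 == nxt) && st.1 then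
      let mark1 := st.2.1 ++ [("end", p.1)]
      let mark2 := mark1 ++ [("count", pvDget mark1 "end" - pvDget mark1 "begin" + 1)]
      (false, mark2, st.2.2 ++ [mark2])
    else st

def get_equal_intervals (array : List Int) : List (List (String × Int)) :=
  let res := (PySem.List.enumerate (PySem.List.slice array none (some (-1))) 0).foldl
      (pvStepA array) (false, ([] : List (String × Int)), ([] : List (List (String × Int))))
  if res.1 then
    let mark1 := res.2.1 ++ [("end", (array.length : Int) - 1)]
    let mark2 := mark1 ++ [("count", pvDget mark1 "end" - pvDget mark1 "begin" + 1)]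
    res.2.2 ++ [mark2]
  else res.2.2

-- ===== PORT B =====
-- inner while loop of B: how many further elements equal v at the front of l
def pvRunMore (v : Int) (l : List Int) : Nat :=
  match l with
  | [] => 0
  | y :: ys => if y == v then 1 + pvRunMore v ys else 0

-- outer while loop of B: rest = v :: t, k = run length, rest[k:] = t.drop (k-1)
def pvScan (start : Int) (rest : List Int) : List (List (String × Int)) :=
  match rest with
  | [] => []
  | v :: t =>
    let k := 1 + pvRunMore v t
    (if 2 ≤ k then
       [[("value", v), ("begin", start), ("end", start + (k : Int) - 1), ("count", (k : Int))]]
     else [])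
      ++ pvScan (start + (k : Int)) (t.drop (pvRunMore v t))
termination_by rest.length
decreasing_by
  simp only [List.length_cons, List.length_drop]; omega

def get_equal_intervals_alt (array : List Int) : List (List (String × Int)) :=
  pvScan 0 array

-- ===== PRECONDITION & SPEC =====
def Spec_get_equal_intervals (array : List Int) (out : List (List (String × Int))) : Prop := out = get_equal_intervals_alt array
instance (array : List Int) (out : List (List (String × Int))) : Decidable (Spec_get_equal_intervals array out) := by unfold Spec_get_equal_intervals; infer_instance

-- ===== CLAIM (what is proved, stated in full; the proofs are below) =====
def Claim_equal_get_equal_intervals : Prop := ∀ (array : List Int), Dom_get_equal_intervals array → Spec_get_equal_intervals array (get_equal_intervals array)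

-- ===== LEMMAS AND PROOFS =====

-- A's loop reads adjacent pairs; make them explicit
def pvPairs (l : List Int) : List (Int × Int) := l.zip l.tail

-- A's loop step with the looked-up neighbour already supplied: p = (num, (val, nxt))
def pvStep2 (st : Bool × List (String × Int) × List (List (String × Int)))
    (p : Int × Int × Int) : Bool × List (String × Int) × List (List (String × Int)) :=
  if (p.2.1 == p.2.2) && !st.1 then
    (true, [("value", p.2.1), ("begin", p.1)], st.2.2)
  else if (p.2.1 == p.2.2) && st.1 then st
  else if !(p.2.1 == p.2.2) && st.1 then
    let mark1 := st.2.1 ++ [("end", p.1)]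
    let mark2 := mark1 ++ [("count", pvDget mark1 "end" - pvDget mark1 "begin" + 1)]
    (false, mark2, st.2.2 ++ [mark2])
  else st

-- A's post-loop flush, with the closing index e made explicit
def pvClose (m : List (String × Int)) (e : Int) : List (String × Int) :=
  let mark1 := m ++ [("end", e)]
  mark1 ++ [("count", pvDget mark1 "end" - pvDget mark1 "begin" + 1)]

def pvFin (e : Int) (st : Bool × List (String × Int) × List (List (String × Int))) :
    List (List (String × Int)) :=
  if st.1 then st.2.2 ++ [pvClose st.2.1 e] else st.2.2

lemma pvMap_fst_pairs (l : List Int) : (pvPairs l).map (·.1) = l.dropLast := by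
  induction l with
  | nil => rfl
  | cons x xs ih =>
    cases xs with
    | nil => rfl
    | cons y ys => simpa [pvPairs] using ih

lemma pvEnumerate_map {α β : Type} (f : α → β) (xs : List α) (s : Int) :
    PySem.List.enumerate (xs.map f) s
      = (PySem.List.enumerate xs s).map (fun p => (p.1, f p.2)) := by
  induction xs generalizing s with
  | nil => rfl
  | cons x xs ih => simp [PySem.List.enumerate_cons, ih]

lemma pvBridge (array : List Int) (st : Bool × List (String × Int) × List (List (String × Int))) :
    (PySem.List.enumerate array.dropLast 0).foldl (pvStepA array) st
      = (PySem.List.enumerate (pvPairs array) 0).foldl pvStep2 st := by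
  rw [← pvMap_fst_pairs, pvEnumerate_map, List.foldl_map]
  apply PySem.List.foldl_congr_mem
  intro acc p hp
  rw [PySem.List.mem_enumerate_iff] at hp
  obtain ⟨i, hi, rfl⟩ := hp
  have hlen : i < array.tail.length := by
    simpa [pvPairs, List.length_zip] using hi
  have hi1 : i + 1 < array.length := by
    rcases array with _ | ⟨a, t⟩ <;> simp_all
  have hget : PySem.List.pyGet? array ((0 : Int) + (i : Int) + 1) = some array[i + 1] := by
    have : ((0 : Int) + (i : Int) + 1) = ((i + 1 : Nat) : Int) := by push_cast; ring
    rw [this, PySem.List.pyGet?_natCast, List.getElem?_eq_getElem hi1]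
  simp only [pvStepA, pvStep2, hget]
  have hsnd : (pvPairs array)[i] = (array[i], array[i + 1]) := by
    simp [pvPairs, List.getElem_zip, List.getElem_tail]
  rw [hsnd]

-- the closed dict of a run of value x begun at b and ended at e
lemma pvClose_markX (x b e : Int) :
    pvClose [("value", x), ("begin", b)] e
      = [("value", x), ("begin", b), ("end", e), ("count", e - b + 1)] := by
  simp [pvClose, pvDget, List.find?]

-- Main invariant, both loop states at once, by strong induction on the suffix length.
-- G1: from a closed state (flag = False) the rest of A's loop + flush produces B's scan of the suffix.
-- G2: from an open state (flag = True, run of x begun at b) it closes that run and continues.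
lemma pvG : ∀ (n : Nat) (t : List Int), t.length ≤ n →
    (∀ (k : Int) (m0 : List (String × Int)) (acc : List (List (String × Int))),
      pvFin (k + t.length - 1) ((PySem.List.enumerate (pvPairs t) k).foldl pvStep2 (false, m0, acc))
        = acc ++ pvScan k t)
    ∧ (∀ (x : Int) (xs : List Int), t = x :: xs → ∀ (k b : Int) (acc : List (List (String × Int))),
      pvFin (k + t.length - 1)
          ((PySem.List.enumerate (pvPairs t) k).foldl pvStep2
            (true, [("value", x), ("begin", b)], acc))
        = acc ++ [[("value", x), ("begin", b), ("end", k + pvRunMore x xs),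
                   ("count", k + pvRunMore x xs - b + 1)]]
            ++ pvScan (k + pvRunMore x xs + 1) (xs.drop (pvRunMore x xs))) := by
  intro n
  induction n with
  | zero =>
    intro t ht
    have ht0 : t = [] := List.eq_nil_of_length_eq_zero (by omega)
    subst ht0
    refine ⟨fun k m0 acc => ?_, fun x xs h => by simp at h⟩
    rw [pvScan]
    simp [pvPairs, pvFin]
  | succ n ih =>
    intro t ht
    rcases t with _ | ⟨x, xs⟩
    · refine ⟨fun k m0 acc => ?_, fun x xs h => by simp at h⟩
      rw [pvScan]
      simp [pvPairs, pvFin]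
    have hxs : xs.length ≤ n := by simp only [List.length_cons] at ht; omega
    obtain ⟨ih1, ih2⟩ := ih xs hxs
    constructor
    · -- G1 : closed state
      intro k m0 acc
      rcases xs with _ | ⟨y, ys⟩
      · have h0 : ∀ s : Int, pvScan s ([] : List Int) = [] := fun s => by rw [pvScan]
        rw [pvScan]
        simp [pvPairs, pvFin, pvRunMore, h0]
      have hp : pvPairs (x :: y :: ys) = (x, y) :: pvPairs (y :: ys) := by simp [pvPairs]
      rw [hp, PySem.List.enumerate_cons, List.foldl_cons]
      by_cases hxy : x = y
      · subst hxy
        have hstep : pvStep2 (false, m0, acc) (k, (x, x))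
            = (true, [("value", x), ("begin", k)], acc) := by
          simp [pvStep2]
        rw [hstep]
        have hl : k + ((x :: x :: ys).length : Int) - 1
            = (k + 1) + ((x :: ys).length : Int) - 1 := by simp only [List.length_cons]; push_cast; ring
        rw [hl]
        have h2 := ih2 x ys rfl (k + 1) k acc
        rw [h2]
        have hrm : pvRunMore x (x :: ys) = 1 + pvRunMore x ys := by simp [pvRunMore]
        have hdrop : (x :: ys).drop (1 + pvRunMore x ys) = ys.drop (pvRunMore x ys) := by
          rw [Nat.add_comm]; rfl
        rw [pvScan]
        simp only [hrm, hdrop]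
        rw [if_pos (by omega)]
        simp only [List.append_assoc]
        push_cast
        ring_nf
      · have hbeq : (x == y) = false := by simp [hxy]
        have hstep : pvStep2 (false, m0, acc) (k, (x, y)) = (false, m0, acc) := by
          simp [pvStep2, hbeq]
        rw [hstep]
        have hl : k + ((x :: y :: ys).length : Int) - 1
            = (k + 1) + ((y :: ys).length : Int) - 1 := by simp only [List.length_cons]; push_cast; ring
        rw [hl, ih1 (k + 1) m0 acc]
        have hbeq' : (y == x) = false := beq_eq_false_iff_ne.mpr (Ne.symm hxy)
        have hrm : pvRunMore x (y :: ys) = 0 := by simp [pvRunMore, hbeq']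
        conv_rhs => rw [pvScan]
        simp [hrm]
    · -- G2 : open run of x begun at b
      intro x' xs' heq k b acc
      injection heq with h1 h2
      subst h1; subst h2
      rcases xs with _ | ⟨y, ys⟩
      · have h0 : ∀ s : Int, pvScan s ([] : List Int) = [] := fun s => by rw [pvScan]
        simp [pvPairs, pvFin, pvRunMore, pvClose_markX, h0]
      have hp : pvPairs (x :: y :: ys) = (x, y) :: pvPairs (y :: ys) := by simp [pvPairs]
      rw [hp, PySem.List.enumerate_cons, List.foldl_cons]
      by_cases hxy : x = y
      · subst hxy
        have hstep : pvStep2 (true, [("value", x), ("begin", b)], acc) (k, (x, x))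
            = (true, [("value", x), ("begin", b)], acc) := by
          simp [pvStep2]
        rw [hstep]
        have hl : k + ((x :: x :: ys).length : Int) - 1
            = (k + 1) + ((x :: ys).length : Int) - 1 := by simp only [List.length_cons]; push_cast; ring
        rw [hl, ih2 x ys rfl (k + 1) b acc]
        have hrm : pvRunMore x (x :: ys) = 1 + pvRunMore x ys := by simp [pvRunMore]
        have hdrop : (x :: ys).drop (1 + pvRunMore x ys) = ys.drop (pvRunMore x ys) := by
          rw [Nat.add_comm]; rfl
        simp only [hrm, hdrop]
        simp only [List.append_assoc]
        push_cast
        ring_nf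
      · have hbeq : (x == y) = false := by simp [hxy]
        have hstep : pvStep2 (true, [("value", x), ("begin", b)], acc) (k, (x, y))
            = (false, pvClose [("value", x), ("begin", b)] k,
               acc ++ [pvClose [("value", x), ("begin", b)] k]) := by
          simp [pvStep2, pvClose, hbeq]
        rw [hstep]
        have hl : k + ((x :: y :: ys).length : Int) - 1
            = (k + 1) + ((y :: ys).length : Int) - 1 := by simp only [List.length_cons]; push_cast; ring
        rw [hl, ih1 (k + 1) (pvClose [("value", x), ("begin", b)] k) (acc ++ [pvClose [("value", x), ("begin", b)] k])]
        have hbeq' : (y == x) = false := beq_eq_false_iff_ne.mpr (Ne.symm hxy)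
        have hrm : pvRunMore x (y :: ys) = 0 := by simp [pvRunMore, hbeq']
        simp only [hrm, pvClose_markX]
        simp

-- ===== VERDICT (by name: the statement is the Claim_ definition above) =====
theorem get_equal_intervals_spec : Claim_equal_get_equal_intervals := by
  intro array _
  show get_equal_intervals array = get_equal_intervals_alt array
  have h := (pvG array.length array le_rfl).1 0 [] []
  have he : (0 : Int) + (array.length : Int) - 1 = (array.length : Int) - 1 := by ring
  rw [he] at h
  unfold get_equal_intervals get_equal_intervals_alt
  rw [PySem.List.slice_to_neg_one, pvBridge]
  simpa [pvFin, pvClose] using h
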